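-- pv_equiv track=rewrite | github.com/ilokaHZhou/InterviewAndLeetocodes | H/面试/机器人活动区域.py | dfs
-- ===== SOURCE A (Python) =====
-- directions = [[0, 1], [0, -1], [1, 0], [-1, 0]]
--
-- def dfs(matrix, visited, x, y):
--     # 标记当前网格点为已访问
--     visited[x][y] = True
--     # 初始化当前网格点的范围计数为1
--     range = 1
--     # 遍历所有可能的移动方向
--     for direction in directions:
--         newX = x + direction[0]  # 计算新的行坐标
--         newY = y + direction[1]  # 计算新的列坐标
--         # 检查新坐标是否在网格内部，且未访问过，并且满足编号差值绝对值小于等于1的条件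
--         if newX >= 0 and newX < len(matrix) and newY >= 0 and newY < len(matrix[0]) \
--             and not visited[newX][newY] and abs(matrix[newX][newY] - matrix[x][y]) <= 1:
--             # 递归地继续探索并累加可活动的网格点数目
--             range += dfs(matrix, visited, newX, newY)
--     # 返回从当前网格点出发可活动的最大网格点数目
--     return range
-- ===== SOURCE B (Python) =====
-- directions = [[0, 1], [0, -1], [1, 0], [-1, 0]]
--
-- def dfs(matrix, visited, x, y):
--     # Iterative traversal with an explicit stack and push-time marking
--     # (same in-place marking of `visited` as the recursive original).
--     visited[x][y] = True
--     stack = [(x, y)]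
--     count = 0
--     while stack:
--         cx, cy = stack.pop()
--         count += 1
--         for dx, dy in directions:
--             nx, ny = cx + dx, cy + dy
--             if nx >= 0 and nx < len(matrix) and ny >= 0 and ny < len(matrix[0]) \
--                and not visited[nx][ny] and abs(matrix[nx][ny] - matrix[cx][cy]) <= 1:
--                 visited[nx][ny] = True
--                 stack.append((nx, ny))
--     return count
-- ===== Notes on version B (the rewrite author's own statement) =====
-- stated objective: alternative
-- what changed: The recursive DFS is replaced by an iterative traversal with an explicit stack and push-time marking: neighbours are marked and pushed when first seen and counted when popped, so no recursion (and no Python recursion-depth limit) is involved; the count agrees because the adjacency relation is symmetric and each cell is marked exactly once.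
-- outside the precondition, e.g. on dfs([[2, 2]], [[False, False, False], [], [True, True, False]], 0, -1): A returns 3, B returns 3
import Mathlib
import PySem

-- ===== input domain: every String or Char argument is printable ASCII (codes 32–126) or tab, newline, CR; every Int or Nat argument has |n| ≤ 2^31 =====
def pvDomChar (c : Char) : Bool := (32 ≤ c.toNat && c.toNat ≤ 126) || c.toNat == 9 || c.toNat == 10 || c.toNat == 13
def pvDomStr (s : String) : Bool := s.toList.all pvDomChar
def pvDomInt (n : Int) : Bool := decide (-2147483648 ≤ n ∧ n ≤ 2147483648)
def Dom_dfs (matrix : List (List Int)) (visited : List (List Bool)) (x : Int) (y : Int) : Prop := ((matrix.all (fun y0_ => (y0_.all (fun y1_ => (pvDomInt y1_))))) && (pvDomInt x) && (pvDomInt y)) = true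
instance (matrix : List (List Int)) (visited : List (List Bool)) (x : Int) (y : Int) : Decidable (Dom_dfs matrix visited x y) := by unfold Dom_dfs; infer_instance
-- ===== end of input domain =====

-- B replaces A's recursion by an explicit-stack iterative traversal with push-time marking (a different
-- traversal order and marking discipline, same count).  In Python both A and B mark `visited` in place
-- (they end up marking the same cells); the equivalence proved here is about the RETURN value.

-- shared helpers: the Python expressions both sources contain verbatim
-- `directions` global
def pvDirs : List (Int × Int) := [(0, 1), (0, -1), (1, 0), (-1, 0)]
-- matrix[i][j] (total form; every use in the ports is guarded in range, Pre_ gives validity of the start)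
def idxM (m : List (List Int)) (i j : Int) : Int := PySem.List.pyGetD (PySem.List.pyGetD m i []) j 0
-- visited[i][j]
def visB (v : List (List Bool)) (i j : Int) : Bool := PySem.List.pyGetD (PySem.List.pyGetD v i []) j false
-- visited[i][j] = True
def setT (v : List (List Bool)) (i j : Int) : List (List Bool) :=
  PySem.List.pySetD v i (PySem.List.pySetD (PySem.List.pyGetD v i []) j true)
-- number of False cells of visited (used only as a fuel bound for the ports' loops)
def unmarked (v : List (List Bool)) : Nat := (v.map (fun r => r.countP (fun b => !b))).sum
-- the guard of the inner `if`, identical in both Python sources: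
-- newX >= 0 and newX < len(matrix) and newY >= 0 and newY < len(matrix[0])
--   and not visited[newX][newY] and abs(matrix[newX][newY] - matrix[px][py]) <= 1
def condA (m : List (List Int)) (w : List (List Bool)) (px py qx qy : Int) : Bool :=
  decide (0 ≤ qx ∧ qx < (m.length : Int) ∧ 0 ≤ qy ∧ qy < ((PySem.List.pyGetD m 0 []).length : Int)
          ∧ visB w qx qy = false ∧ |idxM m qx qy - idxM m px py| ≤ 1)

-- ===== PORT A =====
-- the `for direction in directions` loop of A (threads (range, visited); recursive call passed as `rec`)
def loopA (m : List (List Int)) (rec : List (List Bool) → Int → Int → Int × List (List Bool))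
    (x y : Int) : List (Int × Int) → Int × List (List Bool) → Int × List (List Bool)
  | [], acc => acc
  | d :: ds, acc =>
      loopA m rec x y ds
        (if condA m acc.2 x y (x + d.1) (y + d.2) then
          let r := rec acc.2 (x + d.1) (y + d.2)
          (acc.1 + r.1, r.2)
        else acc)

-- A's recursive dfs; fuel only makes the recursion structural (never exhausted under Pre_, see dfs)
def dfsGoA (m : List (List Int)) : Nat → List (List Bool) → Int → Int → Int × List (List Bool)
  | 0, v, _, _ => (0, v)
  | f + 1, v, x, y => loopA m (dfsGoA m f) x y pvDirs (1, setT v x y)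

def dfs (matrix : List (List Int)) (visited : List (List Bool)) (x : Int) (y : Int) : Int :=
  (dfsGoA matrix (unmarked visited + 1) visited x y).1

-- ===== PORT B =====
-- the `for dx, dy in directions` loop of B: marks and pushes unvisited admissible neighbours of (cx,cy)
def loopB (m : List (List Int)) (cx cy : Int) :
    List (Int × Int) → List (List Bool) × List (Int × Int) → List (List Bool) × List (Int × Int)
  | [], st => st
  | d :: ds, st =>
      loopB m cx cy ds
        (if condA m st.1 cx cy (cx + d.1) (cy + d.2) then
          (setT st.1 (cx + d.1) (cy + d.2), (cx + d.1, cy + d.2) :: st.2)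
        else st)

-- B's `while stack:` loop (stack top = list head, = Python's append/pop at the right end);
-- fuel only makes the loop structural (never exhausted under Pre_, see dfs_alt)
def dfsGoB (m : List (List Int)) :
    Nat → List (List Bool) → List (Int × Int) → Int → Int × List (List Bool)
  | 0, v, _, c => (c, v)
  | f + 1, v, stack, c =>
      match stack with
      | [] => (c, v)
      | (cx, cy) :: rest =>
          let st := loopB m cx cy pvDirs (v, rest)
          dfsGoB m f st.1 st.2 (c + 1)

def dfs_alt (matrix : List (List Int)) (visited : List (List Bool)) (x : Int) (y : Int) : Int :=
  (dfsGoB matrix (unmarked visited + 2) (setT visited x y) [(x, y)] 0).1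

-- ===== PRECONDITION & SPEC =====
-- Pre_ is the function's natural domain plus a degenerate family on which A trivially returns 1:
-- either every row of `matrix` and of `visited` covers the grid width len(matrix[0]), `visited` has at
-- least len(matrix) rows, and the start (x, y) is a (possibly negative, Python-style) index into the
-- grid; or the start is a valid Python index into `visited` and none of its four neighbours passes the
-- grid bounds test (then A marks the start and returns 1 without ever reading `matrix`).  Outside Pre_
-- Python A raises IndexError, except on accidental shape mismatches that the traversal happens not to
-- touch (no closed form; B returns the same values there, see the cite).
def Pre_dfs (matrix : List (List Int)) (visited : List (List Bool)) (x : Int) (y : Int) : Prop :=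
  ((∀ r ∈ matrix, (PySem.List.pyGetD matrix 0 []).length ≤ r.length)
    ∧ matrix.length ≤ visited.length
    ∧ (∀ r ∈ visited, (PySem.List.pyGetD matrix 0 []).length ≤ r.length)
    ∧ -(matrix.length : Int) ≤ x ∧ x < (matrix.length : Int)
    ∧ -((PySem.List.pyGetD matrix 0 []).length : Int) ≤ y
    ∧ y < ((PySem.List.pyGetD matrix 0 []).length : Int))
  ∨ ((-(visited.length : Int) ≤ x ∧ x < (visited.length : Int)
      ∧ -((PySem.List.pyGetD visited x []).length : Int) ≤ y
      ∧ y < ((PySem.List.pyGetD visited x []).length : Int))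
    ∧ ∀ d ∈ pvDirs,
        ¬(0 ≤ x + d.1 ∧ x + d.1 < (matrix.length : Int)
          ∧ 0 ≤ y + d.2 ∧ y + d.2 < ((PySem.List.pyGetD matrix 0 []).length : Int)))
instance (matrix : List (List Int)) (visited : List (List Bool)) (x : Int) (y : Int) :
    Decidable (Pre_dfs matrix visited x y) := by unfold Pre_dfs; infer_instance

def pvWitness_dfs : List (List Int) × List (List Bool) × Int × Int := ([[0, 1], [5, 1]], [[false, false], [false, false]], 0, 0)

def Spec_dfs (matrix : List (List Int)) (visited : List (List Bool)) (x : Int) (y : Int) (out : Int) : Prop := out = dfs_alt matrix visited x y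
instance (matrix : List (List Int)) (visited : List (List Bool)) (x : Int) (y : Int) (out : Int) : Decidable (Spec_dfs matrix visited x y out) := by unfold Spec_dfs; infer_instance

-- ===== CLAIM (what is proved, stated in full; the proofs are below) =====
def Claim_equal_dfs : Prop := ∀ (matrix : List (List Int)) (visited : List (List Bool)) (x : Int) (y : Int), Dom_dfs matrix visited x y → Pre_dfs matrix visited x y → Spec_dfs matrix visited x y (dfs matrix visited x y)

-- ===== LEMMAS AND PROOFS =====

-- `visited` states compared pointwise (only `true`s are ever added)
def leV (u w : List (List Bool)) : Prop := ∀ a b : Int, visB u a b = true → visB w a b = true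

-- cells reachable from the start (px,py) through cells unvisited in the base state w;
-- condA w at the target bakes in "target in bounds, unvisited in w, value diff ≤ 1"
inductive ReachR (m : List (List Int)) (w : List (List Bool)) (px py : Int) : Int → Int → Prop
  | base (d : Int × Int) (hd : d ∈ pvDirs) (hc : condA m w px py (px + d.1) (py + d.2) = true) :
      ReachR m w px py (px + d.1) (py + d.2)
  | step (rx ry : Int) (d : Int × Int) (h : ReachR m w px py rx ry) (hd : d ∈ pvDirs)
      (hc : condA m w rx ry (rx + d.1) (ry + d.2) = true) :
      ReachR m w px py (rx + d.1) (ry + d.2)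

-- ---- small facts about the PySem indexing primitives, specialised to this file ----

lemma pyIdx?_lt {n : Nat} {i : Int} {k : Nat} (h : PySem.List.pyIdx? n i = some k) : k < n := by
  unfold PySem.List.pyIdx? at h
  split_ifs at h with h1 h2 h3 <;> simp_all <;> omega

lemma pyIdx?_of_range {n : Nat} {i : Int} (h0 : 0 ≤ i) (h1 : i < (n : Int)) :
    PySem.List.pyIdx? n i = some i.toNat := by
  unfold PySem.List.pyIdx?
  split_ifs <;> simp_all

lemma getD_of_idx {α : Type} {xs : List α} {i : Int} {k : Nat} {d : α}
    (h : PySem.List.pyIdx? xs.length i = some k) :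
    PySem.List.pyGetD xs i d = xs.getD k d := by
  simp [PySem.List.pyGetD, PySem.List.pyGet?, h, List.getD_eq_getElem?_getD]

lemma getD_of_idx_none {α : Type} {xs : List α} {i : Int} {d : α}
    (h : PySem.List.pyIdx? xs.length i = none) :
    PySem.List.pyGetD xs i d = d := by
  simp [PySem.List.pyGetD, PySem.List.pyGet?, h]

lemma setD_of_idx {α : Type} {xs : List α} {i : Int} {k : Nat} {v : α}
    (h : PySem.List.pyIdx? xs.length i = some k) :
    PySem.List.pySetD xs i v = xs.set k v := by
  simp [PySem.List.pySetD, PySem.List.pySet?, h]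

lemma setD_of_idx_none {α : Type} {xs : List α} {i : Int} {v : α}
    (h : PySem.List.pyIdx? xs.length i = none) :
    PySem.List.pySetD xs i v = xs := by
  simp [PySem.List.pySetD, PySem.List.pySet?, h]

-- setT is either a no-op or a one-cell List.set/List.set update
lemma setT_cases (v : List (List Bool)) (i j : Int) :
    setT v i j = v ∨
    ∃ a b, a < v.length ∧ setT v i j = v.set a ((v.getD a []).set b true) := by
  unfold setT
  rcases h : PySem.List.pyIdx? v.length i with _ | a
  · left; exact setD_of_idx_none h
  · have ha := pyIdx?_lt h
    rw [setD_of_idx h, getD_of_idx h]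
    rcases h2 : PySem.List.pyIdx? (v.getD a []).length j with _ | b
    · left; rw [setD_of_idx_none h2, List.getD_eq_getElem _ _ ha, List.set_getElem_self ha]
    · right; exact ⟨a, b, ha, by rw [setD_of_idx h2]⟩

lemma shape_setT (v : List (List Bool)) (i j : Int) :
    (setT v i j).map List.length = v.map List.length := by
  rcases setT_cases v i j with h | ⟨a, b, ha, h⟩
  · rw [h]
  · rw [h, List.map_set, List.length_set, List.getD_eq_getElem _ _ ha,
      ← List.getElem_map (f := List.length) (h := by simpa using ha), List.set_getElem_self]

-- reading at nonnegative indices is plain getD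
lemma visB_nonneg {v : List (List Bool)} {a b : Int} (ha : 0 ≤ a) (hb : 0 ≤ b) :
    visB v a b = (v.getD a.toNat []).getD b.toNat false := by
  have key : ∀ {α : Type} (xs : List α) (i : Int) (d : α), 0 ≤ i →
      PySem.List.pyGetD xs i d = xs.getD i.toNat d := by
    intro α xs i d hi
    by_cases hlt : i < (xs.length : Int)
    · exact getD_of_idx (pyIdx?_of_range hi hlt)
    · rw [getD_of_idx_none, List.getD_eq_default]
      · omega
      · unfold PySem.List.pyIdx?; split_ifs <;> simp_all
  unfold visB
  rw [key _ _ _ ha, key _ _ _ hb]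

-- getD through List.set
lemma getD_set {α : Type} (l : List α) (a k : Nat) (x : α) (d : α) :
    (l.set a x).getD k d = if a = k ∧ a < l.length then x else l.getD k d := by
  simp only [List.getD_eq_getElem?_getD, List.getElem?_set]
  split_ifs with h1 h2 h3 h4 <;> simp_all <;> omega

lemma countP_set_bool (l : List Bool) (b : Nat) (x : Bool) (p : Bool → Bool) (h : b < l.length) :
    (l.set b x).countP p + (if p l[b] then 1 else 0) = l.countP p + (if p x then 1 else 0) := by
  induction l generalizing b with
  | nil => simp at h
  | cons hd tl ih =>
    cases b with
    | zero => simp [List.countP_cons]; split_ifs <;> omega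
    | succ b =>
      have := ih b (by simpa using h)
      simp only [List.set_cons_succ, List.countP_cons, List.getElem_cons_succ]
      split_ifs at this ⊢ <;> omega

lemma sum_map_set {α : Type} (l : List α) (a : Nat) (x : α) (f : α → Nat) (h : a < l.length) :
    ((l.set a x).map f).sum + f l[a] = (l.map f).sum + f x := by
  induction l generalizing a with
  | nil => simp at h
  | cons hd tl ih =>
    cases a with
    | zero => simp; omega
    | succ a =>
      have := ih a (by simpa using h)
      simp only [List.set_cons_succ, List.map_cons, List.sum_cons, List.getElem_cons_succ]
      omega

lemma pyGetD_set_some {α : Type} {l : List α} {A k : Nat} {x : α} {a : Int} {d : α}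
    (h : PySem.List.pyIdx? l.length a = some k) :
    PySem.List.pyGetD (l.set A x) a d = if A = k ∧ A < l.length then x else l.getD k d := by
  rw [getD_of_idx (by simpa using h), getD_set]

lemma pyGetD_nil_false (b : Int) : PySem.List.pyGetD ([] : List Bool) b false = false := by
  apply getD_of_idx_none
  unfold PySem.List.pyIdx?
  split_ifs <;> simp_all <;> omega

lemma visB_mono_setT {v : List (List Bool)} {i j a b : Int} (h : visB v a b = true) :
    visB (setT v i j) a b = true := by
  rcases setT_cases v i j with hc | ⟨A, B, hA, hc⟩
  · rwa [hc]
  · unfold visB at h ⊢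
    rw [hc]
    rcases hidx : PySem.List.pyIdx? v.length a with _ | k
    · rw [getD_of_idx_none hidx, pyGetD_nil_false] at h
      exact absurd h (by simp)
    · rw [getD_of_idx hidx] at h
      rw [pyGetD_set_some hidx]
      split_ifs with hAk
      · obtain ⟨hAk, _⟩ := hAk
        subst hAk
        rcases hidx2 : PySem.List.pyIdx? (v.getD A []).length b with _ | k2
        · rw [getD_of_idx_none hidx2] at h
          exact absurd h (by simp)
        · rw [pyGetD_set_some hidx2]
          rw [getD_of_idx hidx2] at h
          split_ifs with hB
          · rfl
          · exact h
      · exact h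

lemma countP_not_set_true_le (row : List Bool) (B : Nat) :
    (row.set B true).countP (fun b => !b) ≤ row.countP (fun b => !b) := by
  by_cases h : B < row.length
  · have := countP_set_bool row B true (fun b => !b) h
    split_ifs at this <;> simp_all <;> omega
  · rw [List.set_eq_of_length_le (by omega)]

lemma unmarked_setT_le (v : List (List Bool)) (i j : Int) : unmarked (setT v i j) ≤ unmarked v := by
  rcases setT_cases v i j with hc | ⟨A, B, hA, hc⟩
  · rw [hc]
  · rw [List.getD_eq_getElem _ _ hA] at hc
    rw [hc]
    unfold unmarked
    have := sum_map_set v A (v[A].set B true) (fun r => r.countP (fun b => !b)) hA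
    have h2 := countP_not_set_true_le (v.getD A []) B
    rw [List.getD_eq_getElem _ _ hA] at h2
    omega

-- a valid nonnegative write: the marked cell reads true, others unchanged, count drops by one
lemma setT_valid {v : List (List Bool)} {i j : Int} (h0 : 0 ≤ i) (h0' : 0 ≤ j)
    (hi : i.toNat < v.length) (hj : j.toNat < (v.getD i.toNat []).length) :
    visB (setT v i j) i j = true
    ∧ (∀ a b : Int, 0 ≤ a → 0 ≤ b → ¬(a = i ∧ b = j) → visB (setT v i j) a b = visB v a b)
    ∧ (visB v i j = false → unmarked (setT v i j) + 1 = unmarked v) := by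
  have hrow : (v.getD i.toNat []).length = (v.getD i.toNat []).length := rfl
  have hidx1 : PySem.List.pyIdx? v.length i = some i.toNat :=
    pyIdx?_of_range h0 (by omega)
  have hidx2 : PySem.List.pyIdx? (v.getD i.toNat []).length j = some j.toNat := by
    apply pyIdx?_of_range h0' (by omega)
  have hset : setT v i j = v.set i.toNat ((v.getD i.toNat []).set j.toNat true) := by
    unfold setT
    rw [getD_of_idx hidx1, setD_of_idx hidx2, setD_of_idx hidx1]
  refine ⟨?_, ?_, ?_⟩
  · rw [visB_nonneg h0 h0', hset, getD_set, if_pos ⟨rfl, hi⟩, getD_set, if_pos ⟨rfl, hj⟩]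
  · intro a b ha hb hne
    rw [visB_nonneg ha hb, visB_nonneg ha hb, hset, getD_set]
    split_ifs with hc
    · obtain ⟨hc, _⟩ := hc
      have hai : a = i := by omega
      rw [getD_set]
      split_ifs with hc2
      · exfalso; exact hne ⟨hai, by omega⟩
      · rw [hai]
    · rfl
  · intro hfalse
    have hg : v.getD i.toNat [] = v[i.toNat] := List.getD_eq_getElem _ _ hi
    have hj' : j.toNat < v[i.toNat].length := by rwa [hg] at hj
    rw [visB_nonneg h0 h0', hg, List.getD_eq_getElem _ _ hj'] at hfalse
    unfold unmarked
    rw [hset, hg]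
    have hs := sum_map_set v i.toNat (v[i.toNat].set j.toNat true)
      (fun r => r.countP (fun b => !b)) hi
    have hc := countP_set_bool v[i.toNat] j.toNat true (fun b => !b) hj'
    rw [hfalse] at hc
    simp only [Bool.not_false, Bool.not_true] at hc
    norm_num at hc
    omega

-- ---- facts about condA and ReachR ----

lemma condA_out (m : List (List Int)) (w : List (List Bool)) (px py qx qy : Int)
    (h : condA m w px py qx qy = true) :
    0 ≤ qx ∧ qx < (m.length : Int) ∧ 0 ≤ qy ∧ qy < ((PySem.List.pyGetD m 0 []).length : Int)
    ∧ visB w qx qy = false ∧ |idxM m qx qy - idxM m px py| ≤ 1 := by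
  simpa [condA] using h

-- a guard that failed stays failed once more cells are marked
lemma condA_false_mono {m : List (List Int)} {u u' : List (List Bool)} {px py qx qy : Int}
    (hle : leV u u') (h : condA m u px py qx qy = false) : condA m u' px py qx qy = false := by
  by_contra hne
  have h' : condA m u' px py qx qy = true := by
    cases hc : condA m u' px py qx qy
    · exact absurd hc hne
    · rfl
  obtain ⟨h1, h2, h3, h4, h5, h6⟩ := condA_out _ _ _ _ _ _ h'
  have hv : visB u qx qy = false := by
    cases hv : visB u qx qy
    · rfl
    · rw [hle _ _ hv] at h5; exact absurd h5 (by simp)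
  rw [show condA m u px py qx qy = true by simp [condA]; tauto] at h
  exact absurd h (by simp)

-- a guard that holds in a larger state holds in a smaller one
lemma condA_true_antimono {m : List (List Int)} {w u : List (List Bool)} {px py qx qy : Int}
    (hle : leV w u) (h : condA m u px py qx qy = true) : condA m w px py qx qy = true := by
  obtain ⟨h1, h2, h3, h4, h5, h6⟩ := condA_out _ _ _ _ _ _ h
  have hv : visB w qx qy = false := by
    cases hv : visB w qx qy
    · rfl
    · rw [hle _ _ hv] at h5; exact absurd h5 (by simp)
  simp [condA]; tauto

lemma condA_false_of_vis {m : List (List Int)} {u : List (List Bool)} {px py qx qy : Int}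
    (h : visB u qx qy = true) : condA m u px py qx qy = false := by
  simp [condA, h]

-- if the guard held in the base state but fails in a larger one, the target must be marked there
lemma vis_of_condA_flip {m : List (List Int)} {w1 u : List (List Bool)} {px py qx qy : Int}
    (hc : condA m w1 px py qx qy = true) (hf : condA m u px py qx qy = false) :
    visB u qx qy = true := by
  obtain ⟨h1, h2, h3, h4, h5, h6⟩ := condA_out _ _ _ _ _ _ hc
  cases hv : visB u qx qy
  · exfalso
    rw [show condA m u px py qx qy = true by simp [condA]; tauto] at hf
    exact absurd hf (by simp)
  · rfl

-- fewer marks, more reach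
lemma ReachR_antimono {m : List (List Int)} {w w' : List (List Bool)} {px py qx qy : Int}
    (hle : leV w w') (h : ReachR m w' px py qx qy) : ReachR m w px py qx qy := by
  induction h with
  | base d hd hc => exact ReachR.base d hd (condA_true_antimono hle hc)
  | step rx ry d h hd hc ih => exact ReachR.step rx ry d ih hd (condA_true_antimono hle hc)

lemma ReachR_trans {m : List (List Int)} {w : List (List Bool)} {px py rx ry qx qy : Int}
    (h1 : ReachR m w px py rx ry) (h2 : ReachR m w rx ry qx qy) : ReachR m w px py qx qy := by
  induction h2 with
  | base d hd hc => exact ReachR.step _ _ d h1 hd hc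
  | step ax ay d h hd hc ih => exact ReachR.step ax ay d ih hd hc

lemma ReachR_target {m : List (List Int)} {w : List (List Bool)} {px py qx qy : Int}
    (h : ReachR m w px py qx qy) :
    0 ≤ qx ∧ 0 ≤ qy ∧ visB w qx qy = false := by
  cases h with
  | base d hd hc =>
    obtain ⟨h1, _, h3, _, h5, _⟩ := condA_out _ _ _ _ _ _ hc
    exact ⟨h1, h3, h5⟩
  | step rx ry d h hd hc =>
    obtain ⟨h1, _, h3, _, h5, _⟩ := condA_out _ _ _ _ _ _ hc
    exact ⟨h1, h3, h5⟩

-- ---- the visited states reachable in the run: shape of matrix ----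
def shapeOKd (m : List (List Int)) (v : List (List Bool)) : Prop :=
  m.length ≤ v.length ∧ ∀ r ∈ v, (PySem.List.pyGetD m 0 []).length ≤ r.length

lemma shapeOKd_of_shape {m : List (List Int)} {u v : List (List Bool)}
    (h : u.map List.length = v.map List.length) (hv : shapeOKd m v) : shapeOKd m u := by
  obtain ⟨hl, hr⟩ := hv
  constructor
  · have := congrArg List.length h
    simp at this
    omega
  · intro r hrmem
    have : r.length ∈ v.map List.length := by rw [← h]; exact List.mem_map_of_mem hrmem
    obtain ⟨r2, hr2, hlen⟩ := List.mem_map.1 this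
    rw [← hlen]
    exact hr r2 hr2

-- in-bounds (w.r.t. matrix) writes into a shapeOKd state are valid
lemma setT_valid_of_shape {m : List (List Int)} {v : List (List Bool)} {i j : Int}
    (hs : shapeOKd m v) (h0 : 0 ≤ i) (h1 : i < (m.length : Int)) (h0' : 0 ≤ j)
    (h1' : j < ((PySem.List.pyGetD m 0 []).length : Int)) :
    visB (setT v i j) i j = true
    ∧ (∀ a b : Int, 0 ≤ a → 0 ≤ b → ¬(a = i ∧ b = j) → visB (setT v i j) a b = visB v a b)
    ∧ (visB v i j = false → unmarked (setT v i j) + 1 = unmarked v) := by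
  obtain ⟨hl, hr⟩ := hs
  have hi : i.toNat < v.length := by omega
  have hrowlen : (PySem.List.pyGetD m 0 []).length ≤ (v.getD i.toNat []).length := by
    apply hr
    rw [List.getD_eq_getElem _ _ hi]
    exact List.getElem_mem _
  exact setT_valid h0 h0' hi (by omega)

-- ---- main lemma for port A ----
-- the `for direction in directions` fold of A, parameterised by the induction hypothesis on the fuel
lemma AmainLoop (m : List (List Int)) (f : Nat)
    (hrec : ∀ (v : List (List Bool)) (x y : Int), shapeOKd m v → unmarked (setT v x y) < f →
      (dfsGoA m f v x y).2.map List.length = (setT v x y).map List.length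
      ∧ leV (setT v x y) (dfsGoA m f v x y).2
      ∧ unmarked (dfsGoA m f v x y).2 ≤ unmarked (setT v x y)
      ∧ (dfsGoA m f v x y).1 + (unmarked (dfsGoA m f v x y).2 : Int)
          = 1 + (unmarked (setT v x y) : Int)
      ∧ (∀ a b : Int, 0 ≤ a → 0 ≤ b → visB (dfsGoA m f v x y).2 a b = true →
          visB (setT v x y) a b = true ∨ ReachR m (setT v x y) x y a b)
      ∧ (∀ a b : Int,
          ((a = x ∧ b = y) ∨
            (0 ≤ a ∧ 0 ≤ b ∧ visB (dfsGoA m f v x y).2 a b = true ∧ visB (setT v x y) a b = false)) →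
          ∀ d ∈ pvDirs,
            condA m (dfsGoA m f v x y).2 a b (a + d.1) (b + d.2) = false))
    (w1 : List (List Bool)) (x y : Int) :
    ∀ (ds : List (Int × Int)) (s : Int × List (List Bool)),
      (∀ e ∈ ds, e ∈ pvDirs) → shapeOKd m s.2 → leV w1 s.2 → unmarked s.2 ≤ f →
      (loopA m (dfsGoA m f) x y ds s).2.map List.length = s.2.map List.length
      ∧ leV s.2 (loopA m (dfsGoA m f) x y ds s).2
      ∧ unmarked (loopA m (dfsGoA m f) x y ds s).2 ≤ unmarked s.2
      ∧ (loopA m (dfsGoA m f) x y ds s).1 + (unmarked (loopA m (dfsGoA m f) x y ds s).2 : Int)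
          = s.1 + (unmarked s.2 : Int)
      ∧ (∀ a b : Int, 0 ≤ a → 0 ≤ b → visB (loopA m (dfsGoA m f) x y ds s).2 a b = true →
          visB s.2 a b = true ∨ ReachR m w1 x y a b)
      ∧ (∀ a b : Int, 0 ≤ a → 0 ≤ b → visB (loopA m (dfsGoA m f) x y ds s).2 a b = true →
          visB s.2 a b = false →
          ∀ d ∈ pvDirs, condA m (loopA m (dfsGoA m f) x y ds s).2 a b (a + d.1) (b + d.2) = false)
      ∧ (∀ d ∈ ds, condA m (loopA m (dfsGoA m f) x y ds s).2 x y (x + d.1) (y + d.2) = false) := by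
  intro ds
  induction ds with
  | nil =>
    intro s _ hs hw hfu
    rw [show loopA m (dfsGoA m f) x y [] s = s from rfl]
    refine ⟨rfl, fun a b h => h, le_refl _, rfl, ?_, ?_, ?_⟩
    · intro a b _ _ h; exact Or.inl h
    · intro a b _ _ h1 h2; rw [h1] at h2; exact absurd h2 (by simp)
    · intro d hd; exact absurd hd (by simp)
  | cons d ds ih =>
    intro s hds hs hw hfu
    have hdmem : d ∈ pvDirs := hds d (List.mem_cons_self ..)
    have hds' : ∀ e ∈ ds, e ∈ pvDirs := fun e he => hds e (List.mem_cons_of_mem _ he)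
    show _ ∧ _ ∧ _ ∧ _ ∧ _ ∧ _ ∧ _
    rw [loopA]
    by_cases hcond : condA m s.2 x y (x + d.1) (y + d.2) = true
    · -- the guard holds: a recursive call on the (fresh, in-bounds) neighbour
      rw [if_pos hcond]
      obtain ⟨hb1, hb2, hb3, hb4, hb5, hb6⟩ := condA_out _ _ _ _ _ _ hcond
      obtain ⟨hvq, hvoth, hvcnt⟩ := setT_valid_of_shape hs hb1 hb2 hb3 hb4
      have hcnt := hvcnt hb5
      have hfu' : unmarked (setT s.2 (x + d.1) (y + d.2)) < f := by omega
      obtain ⟨r1, r2, r3, r4, r5, r6⟩ := hrec s.2 (x + d.1) (y + d.2) hs hfu'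
      set r := dfsGoA m f s.2 (x + d.1) (y + d.2) with hr
      have hshape' : shapeOKd m r.2 :=
        shapeOKd_of_shape (r1.trans (shape_setT _ _ _)) hs
      have hmono' : leV s.2 r.2 := fun a b h => r2 a b (visB_mono_setT h)
      have hw' : leV w1 r.2 := fun a b h => hmono' a b (hw a b h)
      have hfu'' : unmarked r.2 ≤ f := by omega
      obtain ⟨i1, i2, i3, i4, i5, i6, i7⟩ := ih ((s.1 + r.1, r.2)) hds' hshape' hw' hfu''
      set R := loopA m (dfsGoA m f) x y ds (s.1 + r.1, r.2) with hR
      have hmonoR : leV s.2 R.2 := fun a b h => i2 a b (hmono' a b h)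
      -- the neighbour itself ends up marked
      have hvqR : visB R.2 (x + d.1) (y + d.2) = true := i2 _ _ (r2 _ _ hvq)
      -- conversion of the callee's reach to a reach from (x,y) in base w1
      have hreach : ∀ a b : Int, ReachR m (setT s.2 (x + d.1) (y + d.2)) (x + d.1) (y + d.2) a b →
          ReachR m w1 x y a b := by
        intro a b h
        have h1 : ReachR m w1 (x + d.1) (y + d.2) a b :=
          ReachR_antimono (fun a b hh => visB_mono_setT (hw a b hh)) h
        exact ReachR_trans (ReachR.base d hdmem (condA_true_antimono hw hcond)) h1
      have hbase : ReachR m w1 x y (x + d.1) (y + d.2) :=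
        ReachR.base d hdmem (condA_true_antimono hw hcond)
      have i4' : R.1 + (unmarked R.2 : Int) = s.1 + r.1 + (unmarked r.2 : Int) := by
        simpa using i4
      have i3' : unmarked R.2 ≤ unmarked r.2 := by simpa using i3
      refine ⟨i1.trans r1 |>.trans (shape_setT _ _ _), hmonoR, by omega, by push_cast at i4' r4 ⊢; omega, ?_, ?_, ?_⟩
      · -- soundness
        intro a b ha hb h
        rcases i5 a b ha hb h with h' | h'
        · rcases r5 a b ha hb h' with h'' | h''
          · by_cases hq : a = x + d.1 ∧ b = y + d.2
            · exact Or.inr (hq.1 ▸ hq.2 ▸ hbase)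
            · rw [hvoth a b ha hb hq] at h''
              exact Or.inl h''
          · exact Or.inr (hreach a b h'')
        · exact Or.inr h'
      · -- closure for cells marked from state s.2 on
        intro a b ha hb h hnew
        by_cases hv' : visB r.2 a b = true
        · -- marked during the recursive call
          by_cases hq : a = x + d.1 ∧ b = y + d.2
          · intro d' hd'
            have := r6 a b (Or.inl hq) d' hd'
            exact condA_false_mono i2 this
          · have hnew' : visB (setT s.2 (x + d.1) (y + d.2)) a b = false := by
              rw [hvoth a b ha hb hq]; exact hnew
            intro d' hd'
            exact condA_false_mono i2 (r6 a b (Or.inr ⟨ha, hb, hv', hnew'⟩) d' hd')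
        · -- marked later in the fold
          have hv'' : visB r.2 a b = false := by
            cases hvv : visB r.2 a b
            · rfl
            · exact absurd hvv hv'
          exact i6 a b ha hb h hv''
      · -- the processed directions all fail in the final state
        intro d' hd'
        rcases List.mem_cons.1 hd' with hd' | hd'
        · subst hd'
          exact condA_false_of_vis hvqR
        · exact i7 d' hd'
    · -- the guard fails: state unchanged
      rw [if_neg hcond]
      have hcondf : condA m s.2 x y (x + d.1) (y + d.2) = false := by
        cases hc : condA m s.2 x y (x + d.1) (y + d.2)
        · rfl
        · exact absurd hc hcond
      obtain ⟨i1, i2, i3, i4, i5, i6, i7⟩ := ih s hds' hs hw hfu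
      refine ⟨i1, i2, i3, i4, i5, i6, ?_⟩
      intro d' hd'
      rcases List.mem_cons.1 hd' with hd' | hd'
      · subst hd'
        exact condA_false_mono i2 hcondf
      · exact i7 d' hd'

lemma Amain (m : List (List Int)) :
    ∀ f (v : List (List Bool)) (x y : Int),
      shapeOKd m v →
      unmarked (setT v x y) < f →
      (dfsGoA m f v x y).2.map List.length = (setT v x y).map List.length
      ∧ leV (setT v x y) (dfsGoA m f v x y).2
      ∧ unmarked (dfsGoA m f v x y).2 ≤ unmarked (setT v x y)
      ∧ (dfsGoA m f v x y).1 + (unmarked (dfsGoA m f v x y).2 : Int)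
          = 1 + (unmarked (setT v x y) : Int)
      ∧ (∀ a b : Int, 0 ≤ a → 0 ≤ b → visB (dfsGoA m f v x y).2 a b = true →
          visB (setT v x y) a b = true ∨ ReachR m (setT v x y) x y a b)
      ∧ (∀ a b : Int,
          ((a = x ∧ b = y) ∨
            (0 ≤ a ∧ 0 ≤ b ∧ visB (dfsGoA m f v x y).2 a b = true ∧ visB (setT v x y) a b = false)) →
          ∀ d ∈ pvDirs,
            condA m (dfsGoA m f v x y).2 a b (a + d.1) (b + d.2) = false) := by
  intro f
  induction f with
  | zero => intro v x y _ hf; omega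
  | succ f ihf =>
    intro v x y hs hf
    have hs1 : shapeOKd m (setT v x y) := shapeOKd_of_shape (shape_setT _ _ _) hs
    have hgo : dfsGoA m (f + 1) v x y = loopA m (dfsGoA m f) x y pvDirs (1, setT v x y) := rfl
    obtain ⟨l1, l2, l3, l4, l5, l6, l7⟩ :=
      AmainLoop m f (fun v x y hsv hfu => ihf v x y hsv hfu) (setT v x y) x y pvDirs
        (1, setT v x y) (fun e he => he) hs1 (fun a b h => h) (by simpa using Nat.lt_succ_iff.mp hf)
    rw [hgo]
    refine ⟨l1, l2, l3, l4, l5, ?_⟩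
    intro a b h d hd
    rcases h with ⟨ha, hb⟩ | ⟨ha, hb, h1, h2⟩
    · subst ha; subst hb; exact l7 d hd
    · exact l6 a b ha hb h1 h2 d hd

-- ---- main lemma for port B ----
-- the `for dx, dy in directions` fold of B: marks and pushes fresh admissible neighbours of (cx,cy)
lemma BmainLoop (m : List (List Int)) (w1 : List (List Bool)) (x y cx cy : Int)
    (hcxy : (cx, cy) = (x, y) ∨ ReachR m w1 x y cx cy) :
    ∀ (ds : List (Int × Int)) (s : List (List Bool) × List (Int × Int)),
      (∀ e ∈ ds, e ∈ pvDirs) → shapeOKd m s.1 → leV w1 s.1 →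
      (loopB m cx cy ds s).1.map List.length = s.1.map List.length
      ∧ leV s.1 (loopB m cx cy ds s).1
      ∧ unmarked (loopB m cx cy ds s).1 + (loopB m cx cy ds s).2.length
          = unmarked s.1 + s.2.length
      ∧ (∃ pl, (loopB m cx cy ds s).2 = pl ++ s.2)
      ∧ (∀ p ∈ (loopB m cx cy ds s).2, p ∈ s.2 ∨
          (ReachR m w1 x y p.1 p.2 ∧ visB (loopB m cx cy ds s).1 p.1 p.2 = true
            ∧ visB s.1 p.1 p.2 = false ∧ 0 ≤ p.1 ∧ 0 ≤ p.2))
      ∧ (∀ a b : Int, 0 ≤ a → 0 ≤ b → visB (loopB m cx cy ds s).1 a b = true →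
          visB s.1 a b = true ∨ (a, b) ∈ (loopB m cx cy ds s).2)
      ∧ (∀ d ∈ ds, condA m (loopB m cx cy ds s).1 cx cy (cx + d.1) (cy + d.2) = false) := by
  intro ds
  induction ds with
  | nil =>
    intro s _ hs hw
    rw [show loopB m cx cy [] s = s from rfl]
    refine ⟨rfl, fun a b h => h, rfl, ⟨[], rfl⟩, ?_, ?_, ?_⟩
    · intro p hp; exact Or.inl hp
    · intro a b _ _ h; exact Or.inl h
    · intro d hd; exact absurd hd (by simp)
  | cons d ds ih =>
    intro s hds hs hw
    have hdmem : d ∈ pvDirs := hds d (List.mem_cons_self ..)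
    have hds' : ∀ e ∈ ds, e ∈ pvDirs := fun e he => hds e (List.mem_cons_of_mem _ he)
    show _ ∧ _ ∧ _ ∧ _ ∧ _ ∧ _ ∧ _
    rw [loopB]
    by_cases hcond : condA m s.1 cx cy (cx + d.1) (cy + d.2) = true
    · rw [if_pos hcond]
      obtain ⟨hb1, hb2, hb3, hb4, hb5, hb6⟩ := condA_out _ _ _ _ _ _ hcond
      obtain ⟨hvq, hvoth, hvcnt⟩ := setT_valid_of_shape hs hb1 hb2 hb3 hb4
      have hcnt := hvcnt hb5
      have hs' : shapeOKd m (setT s.1 (cx + d.1) (cy + d.2)) :=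
        shapeOKd_of_shape (shape_setT _ _ _) hs
      have hw' : leV w1 (setT s.1 (cx + d.1) (cy + d.2)) :=
        fun a b h => visB_mono_setT (hw a b h)
      obtain ⟨i1, i2, i3, i4, i5, i6, i7⟩ :=
        ih (setT s.1 (cx + d.1) (cy + d.2), (cx + d.1, cy + d.2) :: s.2) hds' hs' hw'
      set R := loopB m cx cy ds (setT s.1 (cx + d.1) (cy + d.2), (cx + d.1, cy + d.2) :: s.2)
        with hR
      have hmono : leV s.1 R.1 := fun a b h => i2 a b (visB_mono_setT h)
      -- the pushed neighbour is reachable from (x,y) and marked for good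
      have hreachq : ReachR m w1 x y (cx + d.1) (cy + d.2) := by
        rcases hcxy with hxy | hr
        · have hx : cx = x := congrArg Prod.fst hxy
          have hy : cy = y := congrArg Prod.snd hxy
          subst hx; subst hy
          exact ReachR.base d hdmem (condA_true_antimono hw hcond)
        · exact ReachR.step cx cy d hr hdmem (condA_true_antimono hw hcond)
      have hvqR : visB R.1 (cx + d.1) (cy + d.2) = true := i2 _ _ hvq
      have hqmemR : (cx + d.1, cy + d.2) ∈ R.2 := by
        obtain ⟨pl, hpl⟩ := i4
        rw [hpl]
        exact List.mem_append_right _ (List.mem_cons_self ..)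
      refine ⟨i1.trans (shape_setT _ _ _), hmono, ?_, ?_, ?_, ?_, ?_⟩
      · have i3' : unmarked R.1 + R.2.length
            = unmarked (setT s.1 (cx + d.1) (cy + d.2)) + (s.2.length + 1) := by
          simpa using i3
        omega
      · obtain ⟨pl, hpl⟩ := i4
        exact ⟨pl ++ [(cx + d.1, cy + d.2)], by simpa using hpl⟩
      · intro p hp
        rcases i5 p hp with hp' | ⟨hr, hvr, hvs, hp1, hp2⟩
        · rcases List.mem_cons.1 hp' with hp'' | hp''
          · subst hp''
            exact Or.inr ⟨hreachq, hvqR, hb5, hb1, hb3⟩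
          · exact Or.inl hp''
        · refine Or.inr ⟨hr, hvr, ?_, hp1, hp2⟩
          by_cases hq : p.1 = cx + d.1 ∧ p.2 = cy + d.2
          · rw [hq.1, hq.2]; exact hb5
          · rw [← hvoth p.1 p.2 hp1 hp2 hq]; exact hvs
      · intro a b ha hb h
        rcases i6 a b ha hb h with h' | h'
        · by_cases hq : a = cx + d.1 ∧ b = cy + d.2
          · exact Or.inr (by rw [hq.1, hq.2]; exact hqmemR)
          · rw [hvoth a b ha hb hq] at h'
            exact Or.inl h'
        · exact Or.inr h'
      · intro d' hd'
        rcases List.mem_cons.1 hd' with hd'' | hd''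
        · subst hd''
          exact condA_false_of_vis hvqR
        · exact i7 d' hd''
    · rw [if_neg hcond]
      have hcondf : condA m s.1 cx cy (cx + d.1) (cy + d.2) = false := by
        cases hc : condA m s.1 cx cy (cx + d.1) (cy + d.2)
        · rfl
        · exact absurd hc hcond
      obtain ⟨i1, i2, i3, i4, i5, i6, i7⟩ := ih s hds' hs hw
      refine ⟨i1, i2, i3, i4, i5, i6, ?_⟩
      intro d' hd'
      rcases List.mem_cons.1 hd' with hd'' | hd''
      · subst hd''
        exact condA_false_mono i2 hcondf
      · exact i7 d' hd''

lemma Bmain (m : List (List Int)) :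
    ∀ f (v : List (List Bool)) (stack : List (Int × Int)) (c : Int) (w1 : List (List Bool)) (x y : Int),
      shapeOKd m v →
      leV w1 v →
      (∀ p ∈ stack, (p = (x, y)) ∨ ReachR m w1 x y p.1 p.2) →
      (∀ a b : Int, 0 ≤ a → 0 ≤ b → (a, b) = (x, y) → visB v a b = true) →
      unmarked v + stack.length < f →
      (dfsGoB m f v stack c).2.map List.length = v.map List.length
      ∧ leV v (dfsGoB m f v stack c).2
      ∧ unmarked (dfsGoB m f v stack c).2 ≤ unmarked v
      ∧ (dfsGoB m f v stack c).1 + (unmarked (dfsGoB m f v stack c).2 : Int)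
          = c + stack.length + (unmarked v : Int)
      ∧ (∀ a b : Int, 0 ≤ a → 0 ≤ b → visB (dfsGoB m f v stack c).2 a b = true →
          visB v a b = true ∨ ReachR m w1 x y a b)
      ∧ (∀ a b : Int,
          ((a, b) ∈ stack ∨
            (0 ≤ a ∧ 0 ≤ b ∧ visB (dfsGoB m f v stack c).2 a b = true ∧ visB v a b = false)) →
          ∀ d ∈ pvDirs,
            condA m (dfsGoB m f v stack c).2 a b (a + d.1) (b + d.2) = false) := by
  intro f
  induction f with
  | zero => intro v stack c w1 x y _ _ _ _ hf; omega
  | succ f ihf =>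
    intro v stack c w1 x y hs hw hstack hxyv hf
    match stack with
    | [] =>
      rw [show dfsGoB m (f + 1) v [] c = (c, v) from rfl]
      refine ⟨rfl, fun a b h => h, le_refl _, by simp, ?_, ?_⟩
      · intro a b _ _ h; exact Or.inl h
      · intro a b h
        rcases h with h | ⟨_, _, h1, h2⟩
        · exact absurd h (by simp)
        · rw [h1] at h2; exact absurd h2 (by simp)
    | (cx, cy) :: rest =>
      have hgo : dfsGoB m (f + 1) v ((cx, cy) :: rest) c
          = dfsGoB m f (loopB m cx cy pvDirs (v, rest)).1 (loopB m cx cy pvDirs (v, rest)).2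
              (c + 1) := rfl
      obtain ⟨l1, l2, l3, l4, l5, l6, l7⟩ :=
        BmainLoop m w1 x y cx cy (hstack (cx, cy) (List.mem_cons_self ..)) pvDirs (v, rest)
          (fun e he => he) hs hw
      set st := loopB m cx cy pvDirs (v, rest) with hst
      have l3' : unmarked st.1 + st.2.length = unmarked v + rest.length := l3
      have hf' : unmarked v + rest.length + 1 < f + 1 := by
        simp only [List.length_cons] at hf
        omega
      have hlen : rest.length ≤ st.2.length := by
        obtain ⟨pl, hpl⟩ := l4
        rw [hpl]
        simp
      have hrestR : ∀ p ∈ rest, p ∈ st.2 := by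
        intro p hp
        obtain ⟨pl, hpl⟩ := l4
        rw [hpl]
        exact List.mem_append_right _ hp
      obtain ⟨i1, i2, i3, i4, i5, i6⟩ :=
        ihf st.1 st.2 (c + 1) w1 x y (shapeOKd_of_shape l1 hs) (fun a b h => l2 a b (hw a b h))
          (by
            intro p hp
            rcases l5 p hp with hp' | ⟨hr, _, _, _, _⟩
            · exact hstack p (List.mem_cons_of_mem _ hp')
            · exact Or.inr hr)
          (fun a b ha hb heq => l2 a b (hxyv a b ha hb heq))
          (by omega)
      rw [hgo]
      refine ⟨i1.trans l1, fun a b h => i2 a b (l2 a b h), by omega, ?_, ?_, ?_⟩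
      · have i4' : (dfsGoB m f st.1 st.2 (c + 1)).1
            + (unmarked (dfsGoB m f st.1 st.2 (c + 1)).2 : Int)
            = (c + 1) + st.2.length + (unmarked st.1 : Int) := i4
        simp only [List.length_cons]
        push_cast at i4' ⊢
        omega
      · intro a b ha hb h
        rcases i5 a b ha hb h with h' | h'
        · rcases l6 a b ha hb h' with h'' | h''
          · exact Or.inl h''
          · rcases l5 (a, b) h'' with hp' | ⟨hr, _, _, _, _⟩
            · rcases hstack (a, b) (List.mem_cons_of_mem _ hp') with he | hr'
              · exact Or.inl (hxyv a b ha hb he)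
              · exact Or.inr hr'
            · exact Or.inr hr
        · exact Or.inr h'
      · intro a b hpre d hd
        rcases hpre with hmem | ⟨ha, hb, h1, h2⟩
        · rcases List.mem_cons.1 hmem with he | hmem'
          · have hab : a = cx ∧ b = cy := by
              constructor
              · exact congrArg Prod.fst he
              · exact congrArg Prod.snd he
            rw [hab.1, hab.2]
            exact condA_false_mono i2 (l7 d hd)
          · exact i6 a b (Or.inl (hrestR (a, b) hmem')) d hd
        · by_cases hv' : visB st.1 a b = true
          · rcases l6 a b ha hb hv' with h'' | h''
            · exact absurd h'' (by rw [h2]; simp)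
            · exact i6 a b (Or.inl h'') d hd
          · have hv'' : visB st.1 a b = false := by
              cases hvv : visB st.1 a b
              · rfl
              · exact absurd hvv hv'
            exact i6 a b (Or.inr ⟨ha, hb, h1, hv''⟩) d hd

-- reach-completeness from the closure property (shared by both final states)
lemma reach_marked {m : List (List Int)} {w1 u : List (List Bool)} {x y : Int}
    (hclos : ∀ a b : Int,
      ((a = x ∧ b = y) ∨ (0 ≤ a ∧ 0 ≤ b ∧ visB u a b = true ∧ visB w1 a b = false)) →
      ∀ d ∈ pvDirs, condA m u a b (a + d.1) (b + d.2) = false) :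
    ∀ qx qy : Int, ReachR m w1 x y qx qy → visB u qx qy = true := by
  intro qx qy h
  induction h with
  | base d hd hc =>
    exact vis_of_condA_flip hc (hclos x y (Or.inl ⟨rfl, rfl⟩) d hd)
  | step rx ry d h hd hc ih =>
    obtain ⟨h1, h2, h3⟩ := ReachR_target h
    exact vis_of_condA_flip hc (hclos rx ry (Or.inr ⟨h1, h2, ih, h3⟩) d hd)

-- the two final visited states are pointwise equal, hence equal as lists
lemma vout_eq {uA uB v : List (List Bool)}
    (hA : uA.map List.length = v.map List.length) (hB : uB.map List.length = v.map List.length)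
    (h : ∀ a b : Int, 0 ≤ a → 0 ≤ b → visB uA a b = visB uB a b) : uA = uB := by
  have hlen : uA.length = uB.length := by
    have h1 := congrArg List.length hA
    have h2 := congrArg List.length hB
    simp at h1 h2; omega
  apply List.ext_getElem hlen
  intro i hiA hiB
  have hrl : uA[i].length = uB[i].length := by
    have h1 : (uA.map List.length)[i]'(by simpa using hiA) = (uB.map List.length)[i]'(by simpa using hiB) := by
      simp only [hA, hB]
    simpa using h1
  apply List.ext_getElem hrl
  intro j hjA hjB
  have hv := h i j (by positivity) (by positivity)
  rw [visB_nonneg (by positivity) (by positivity), visB_nonneg (by positivity) (by positivity)] at hv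
  simp only [Int.toNat_natCast] at hv
  rwa [List.getD_eq_getElem _ _ hiA, List.getD_eq_getElem _ _ hiB,
    List.getD_eq_getElem _ _ hjA, List.getD_eq_getElem _ _ hjB] at hv

-- on the degenerate Pre_ branch every direction fails the bounds test, in any visited state
lemma condA_oob {m : List (List Int)} {w : List (List Bool)} {px py qx qy : Int}
    (hb : ¬(0 ≤ qx ∧ qx < (m.length : Int) ∧ 0 ≤ qy
            ∧ qy < ((PySem.List.pyGetD m 0 []).length : Int))) :
    condA m w px py qx qy = false := by
  simp only [condA, decide_eq_false_iff_not]
  tauto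

lemma loopA_id (m : List (List Int)) (rec : List (List Bool) → Int → Int → Int × List (List Bool))
    (x y : Int) :
    ∀ (ds : List (Int × Int)) (acc : Int × List (List Bool)),
      (∀ d ∈ ds, ∀ w : List (List Bool), condA m w x y (x + d.1) (y + d.2) = false) →
      loopA m rec x y ds acc = acc := by
  intro ds
  induction ds with
  | nil => intro acc _; rfl
  | cons d ds ih =>
    intro acc hall
    rw [loopA, if_neg (by rw [hall d (List.mem_cons_self ..) acc.2]; simp),
      ih acc (fun d' hd' => hall d' (List.mem_cons_of_mem _ hd'))]

lemma loopB_id (m : List (List Int)) (cx cy : Int) :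
    ∀ (ds : List (Int × Int)) (st : List (List Bool) × List (Int × Int)),
      (∀ d ∈ ds, ∀ w : List (List Bool), condA m w cx cy (cx + d.1) (cy + d.2) = false) →
      loopB m cx cy ds st = st := by
  intro ds
  induction ds with
  | nil => intro st _; rfl
  | cons d ds ih =>
    intro st hall
    rw [loopB, if_neg (by rw [hall d (List.mem_cons_self ..) st.1]; simp),
      ih st (fun d' hd' => hall d' (List.mem_cons_of_mem _ hd'))]

-- ===== VERDICT (by name: the statement is the Claim_ definition above) =====
theorem dfs_spec : Claim_equal_dfs := by
  intro matrix visited x y _ hpre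
  show dfs matrix visited x y = dfs_alt matrix visited x y
  simp only [dfs, dfs_alt]
  rcases hpre with hpre | ⟨_, hnb⟩
  case inr =>
    -- degenerate branch: no neighbour is in the grid, both traversals stop after the start cell
    have hall : ∀ d ∈ pvDirs, ∀ w : List (List Bool),
        condA matrix w x y (x + d.1) (y + d.2) = false :=
      fun d hd w => condA_oob (hnb d hd)
    have hA : dfsGoA matrix (unmarked visited + 1) visited x y
        = (1, setT visited x y) := by
      show loopA matrix (dfsGoA matrix (unmarked visited)) x y pvDirs (1, setT visited x y)
          = (1, setT visited x y)
      exact loopA_id _ _ _ _ pvDirs _ hall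
    have hB : dfsGoB matrix (unmarked visited + 2) (setT visited x y) [(x, y)] 0
        = (1, setT visited x y) := by
      show dfsGoB matrix (unmarked visited + 1)
          (loopB matrix x y pvDirs (setT visited x y, [])).1
          (loopB matrix x y pvDirs (setT visited x y, [])).2 (0 + 1)
          = (1, setT visited x y)
      rw [loopB_id _ _ _ pvDirs _ hall]
      rfl
    rw [hA, hB]
  obtain ⟨hrect, hvl, hvr, hx1, hx2, hy1, hy2⟩ := hpre
  have hs : shapeOKd matrix visited := ⟨hvl, hvr⟩
  have hsw1 : shapeOKd matrix (setT visited x y) := shapeOKd_of_shape (shape_setT _ _ _) hs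
  have hle := unmarked_setT_le visited x y
  obtain ⟨a1, a2, a3, a4, a5, a6⟩ :=
    Amain matrix (unmarked visited + 1) visited x y hs (by omega)
  set RA := dfsGoA matrix (unmarked visited + 1) visited x y with hRA
  have hxyv : ∀ a b : Int, 0 ≤ a → 0 ≤ b → (a, b) = (x, y) →
      visB (setT visited x y) a b = true := by
    intro a b ha hb he
    have hax : a = x := congrArg Prod.fst he
    have hby : b = y := congrArg Prod.snd he
    subst hax; subst hby
    exact (setT_valid_of_shape hs ha hx2 hb hy2).1
  obtain ⟨b1, b2, b3, b4, b5, b6⟩ :=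
    Bmain matrix (unmarked visited + 2) (setT visited x y) [(x, y)] 0 (setT visited x y) x y
      hsw1 (fun a b h => h)
      (fun p hp => Or.inl (List.mem_singleton.1 hp))
      hxyv
      (by simp only [List.length_cons, List.length_nil]; omega)
  set RB := dfsGoB matrix (unmarked visited + 2) (setT visited x y) [(x, y)] 0 with hRB
  have hclosB : ∀ a b : Int,
      ((a = x ∧ b = y) ∨
        (0 ≤ a ∧ 0 ≤ b ∧ visB RB.2 a b = true ∧ visB (setT visited x y) a b = false)) →
      ∀ d ∈ pvDirs, condA matrix RB.2 a b (a + d.1) (b + d.2) = false := by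
    intro a b h
    apply b6
    rcases h with ⟨ha, hb⟩ | h
    · subst ha; subst hb
      exact Or.inl (List.mem_singleton.2 rfl)
    · exact Or.inr h
  have hchar : ∀ a b : Int, 0 ≤ a → 0 ≤ b → visB RA.2 a b = visB RB.2 a b := by
    intro a b ha hb
    have hfwd : visB RA.2 a b = true → visB RB.2 a b = true := by
      intro h
      rcases a5 a b ha hb h with h' | h'
      · exact b2 a b h'
      · exact reach_marked hclosB a b h'
    have hbwd : visB RB.2 a b = true → visB RA.2 a b = true := by
      intro h
      rcases b5 a b ha hb h with h' | h'
      · exact a2 a b h'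
      · exact reach_marked a6 a b h'
    cases hA : visB RA.2 a b
    · cases hB : visB RB.2 a b
      · rfl
      · rw [← hA, hbwd hB]
    · exact (hfwd hA).symm
  have hAB : RA.2 = RB.2 :=
    vout_eq (a1.trans (shape_setT _ _ _)) (b1.trans (shape_setT _ _ _)) hchar
  have b4' : RB.1 + (unmarked RB.2 : Int) = 1 + (unmarked (setT visited x y) : Int) := by
    simpa using b4
  rw [hAB] at a4
  omega
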